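-- pv_equiv track=rewrite | github.com/isak-kang/coding_test | programmers/lv2/택배상자.py | solution
-- ===== SOURCE A (Python) =====
-- def solution(order):
--     stack = []
--
--     count = 1
--     answer = 0 #답 , 트럭에 실린 수.
--
--     while len(order)+1 >= count:
--
--         if answer >= len(order):
--             break
--         if stack:
--             if stack[-1] == order[answer]:
--                 answer += 1
--                 stack.pop(-1)
--                 continue
--
--         if order[answer] == count :
--             answer += 1
--         elif  order[answer] != count:
--             stack.append(count)
--
--
--
--         count += 1
--
--     return answer
-- ===== SOURCE B (Python) =====
-- def solution(order):
--     # B: no stack -- a boolean "loaded" table over the belt numbers plus a lazy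
--     # pointer p to the largest belt box already taken off the belt but not loaded.
--     n = len(order)
--     loaded = [False] * (n + 2)
--     c = 1          # next box still on the belt (belt carries 1..n+1 as in the spec)
--     p = 0          # upper bound for the largest pending (taken-off, unloaded) box
--     for i, w in enumerate(order):
--         if c > n + 1:
--             return i
--         while p > 0 and loaded[p]:
--             p -= 1
--         if p > 0 and p == w:
--             loaded[p] = True          # load the pending box w
--         elif 1 <= w <= n + 1 and c <= w:
--             loaded[w] = True          # take boxes c..w off the belt, load w
--             c = w + 1
--             p = w - 1
--         else:
--             return i
--     return n
-- ===== Notes on version B (the rewrite author's own statement) =====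
-- stated objective: faster
-- what changed: Replaces A's explicit stack simulation with a stack-free algorithm: a boolean 'loaded' table over the belt numbers plus a lazily-descending pointer to the largest pending box, exploiting the invariant that A's stack is always exactly the unloaded numbers below the belt position in increasing order (so its top is their maximum).
import Mathlib
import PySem

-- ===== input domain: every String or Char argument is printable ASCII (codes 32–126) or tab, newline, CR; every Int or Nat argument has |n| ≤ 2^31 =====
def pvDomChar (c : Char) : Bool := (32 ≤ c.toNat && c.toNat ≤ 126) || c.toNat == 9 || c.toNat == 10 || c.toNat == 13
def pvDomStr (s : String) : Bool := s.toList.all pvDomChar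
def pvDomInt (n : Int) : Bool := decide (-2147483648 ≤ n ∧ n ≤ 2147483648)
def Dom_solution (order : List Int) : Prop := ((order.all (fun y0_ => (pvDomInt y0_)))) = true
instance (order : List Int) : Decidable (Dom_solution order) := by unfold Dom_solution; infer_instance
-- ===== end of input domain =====

-- B replaces A's explicit stack by a boolean loaded-table over the belt numbers plus a
-- lazily-descending pointer to the largest pending box (objective: faster, measured constant-factor).
-- The `fuel` argument of A's loop is a totality guard only: the loop runs at most
-- 2*(len+2-count)+|stack| more steps, so the supplied fuel is never exhausted.

-- ===== PORT A =====
-- A's single while loop: state (stack, count, answer); indices/counters kept as Nat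
-- (they start at 0/1 and only increase, so this is exact).
def solutionLoop (order : List Int) (stack : List Int) (count : Nat) (answer : Nat) : Nat → Nat
  | 0 => answer
  | fuel + 1 =>
    if count ≤ order.length + 1 then
      if answer ≥ order.length then answer
      else
        match stack with
        | top :: rest =>
          if top = order.getD answer 0 then
            solutionLoop order rest count (answer + 1) fuel
          else if order.getD answer 0 = (count : Int) then
            solutionLoop order (top :: rest) (count + 1) (answer + 1) fuel
          else
            solutionLoop order (((count : Int)) :: top :: rest) (count + 1) answer fuel
        | [] =>
          if order.getD answer 0 = (count : Int) then
            solutionLoop order [] (count + 1) (answer + 1) fuel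
          else
            solutionLoop order [((count : Int))] (count + 1) answer fuel
    else answer

def solution (order : List Int) : Int :=
  (solutionLoop order [] 1 0 (2 * (order.length + 2)) : Int)

-- ===== PORT B =====
-- Source B's inner `while p > 0 and loaded[p]: p -= 1`, by structural recursion on p
def skipPtr (loaded : List Bool) : Nat → Nat
  | 0 => 0
  | p + 1 => if loaded.getD (p + 1) false then skipPtr loaded p else p + 1

-- Source B's for-loop over order: state (loaded table, belt position c, pointer p, index i)
def bOuter (n : Nat) (loaded : List Bool) (c p i : Nat) : List Int → Nat
  | [] => n
  | w :: rest =>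
    if n + 1 < c then i
    else
      let s := skipPtr loaded p
      if 0 < s ∧ (s : Int) = w then
        bOuter n (loaded.set s true) c s (i + 1) rest
      else if 1 ≤ w ∧ w ≤ (n : Int) + 1 ∧ (c : Int) ≤ w then
        bOuter n (loaded.set w.toNat true) (w.toNat + 1) (w.toNat - 1) (i + 1) rest
      else i

def solution_alt (order : List Int) : Int :=
  (bOuter order.length (List.replicate (order.length + 2) false) 1 0 0 order : Int)

-- ===== PRECONDITION & SPEC =====
def Spec_solution (order : List Int) (out : Int) : Prop := out = solution_alt order
instance (order : List Int) (out : Int) : Decidable (Spec_solution order out) := by unfold Spec_solution; infer_instance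

-- ===== CLAIM (what is proved, stated in full; the proofs are below) =====
def Claim_equal_solution : Prop := ∀ (order : List Int), Dom_solution order → Spec_solution order (solution order)

-- ===== LEMMAS AND PROOFS =====

theorem getD_set_self (l : List Bool) (i : Nat) (h : i < l.length) :
    (l.set i true).getD i false = true := by
  simp [List.getD, h]

theorem getD_set_ne (l : List Bool) (i j : Nat) (h : i ≠ j) :
    (l.set i true).getD j false = l.getD j false := by
  simp [List.getD, List.getElem?_set_ne h]

theorem skipPtr_le (l : List Bool) (p : Nat) : skipPtr l p ≤ p := by
  induction p with
  | zero => simp [skipPtr]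
  | succ p ih =>
    rw [skipPtr]
    split
    · omega
    · omega

theorem skipPtr_above (l : List Bool) (p : Nat) :
    ∀ q, skipPtr l p < q → q ≤ p → l.getD q false = true := by
  induction p with
  | zero => intro q h1 h2; omega
  | succ p ih =>
    intro q h1 h2
    rw [skipPtr] at h1
    by_cases hl : l.getD (p + 1) false = true
    · rw [if_pos hl] at h1
      rcases Nat.lt_or_ge q (p + 1) with h | h
      · exact ih q h1 (by omega)
      · have : q = p + 1 := by omega
        rw [this]; exact hl
    · rw [if_neg hl] at h1; omega

theorem skipPtr_unl (l : List Bool) (p : Nat) :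
    skipPtr l p = 0 ∨ l.getD (skipPtr l p) false = false := by
  induction p with
  | zero => left; rfl
  | succ p ih =>
    rw [skipPtr]
    by_cases hl : l.getD (p + 1) false = true
    · rw [if_pos hl]; exact ih
    · rw [if_neg hl]; right; simpa using hl

-- dropping an all-false suffix of the filtered range
theorem filter_range'_high (f : Nat → Bool) (s : Nat) :
    ∀ m, s ≤ m → (∀ q, s < q → q ≤ m → f q = false) →
      (List.range' 1 m).filter f = (List.range' 1 s).filter f := by
  intro m
  induction m with
  | zero =>
    intro h _
    have h0 : s = 0 := Nat.le_zero.mp h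
    subst h0
    rfl
  | succ m ih =>
    intro hs hh
    rcases Nat.lt_or_ge s (m + 1) with h | h
    · have hconc : List.range' 1 (m + 1) = List.range' 1 m ++ [1 + m] := by
        simpa using (List.range'_concat (s := 1) (n := m) (step := 1))
      rw [hconc, List.filter_append]
      have hf : f (1 + m) = false := hh (1 + m) (by omega) (by omega)
      simp only [List.filter_cons, hf, List.filter_nil, Bool.false_eq_true, if_false,
        List.append_nil]
      exact ih (by omega) (fun q h1 h2 => hh q h1 (by omega))
    · have h0 : s = m + 1 := by omega
      subst h0
      rfl

theorem rev_filter_split (f : Nat → Bool) (m s : Nat) (hs : s ≤ m)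
    (hh : ∀ q, s < q → q ≤ m → f q = false) (hl : s = 0 ∨ f s = true) :
    ((List.range' 1 m).filter f).reverse
      = if s = 0 then [] else s :: ((List.range' 1 (s - 1)).filter f).reverse := by
  rw [filter_range'_high f s m hs hh]
  rcases Nat.eq_zero_or_pos s with h0 | hp
  · subst h0; rfl
  · have hf : f s = true := by
      rcases hl with h | h
      · omega
      · exact h
    rw [if_neg (by omega)]
    have hconc : List.range' 1 s = List.range' 1 (s - 1) ++ [s] := by
      have h1 := List.range'_concat (s := 1) (n := s - 1) (step := 1)
      have h2 : 1 + 1 * (s - 1) = s := by omega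
      have h3 : (s - 1) + 1 = s := by omega
      rw [h2, h3] at h1
      exact h1
    rw [hconc, List.filter_append]
    simp [hf]

theorem drop_cons_getD (order : List Int) (ans : Nat) (h : ans < order.length) :
    order.drop ans = order.getD ans 0 :: order.drop (ans + 1) := by
  rw [List.drop_eq_getElem_cons h, List.getD_eq_getElem order 0 h]

-- one unfolding step of B's loop
theorem bOuter_cons (n : Nat) (loaded : List Bool) (c p i : Nat) (w : Int) (rest : List Int) :
    bOuter n loaded c p i (w :: rest)
      = if n + 1 < c then i
        else if 0 < skipPtr loaded p ∧ ((skipPtr loaded p : Nat) : Int) = w then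
          bOuter n (loaded.set (skipPtr loaded p) true) c (skipPtr loaded p) (i + 1) rest
        else if 1 ≤ w ∧ w ≤ (n : Int) + 1 ∧ (c : Int) ≤ w then
          bOuter n (loaded.set w.toNat true) (w.toNat + 1) (w.toNat - 1) (i + 1) rest
        else i := rfl

theorem range'_one_concat (m : Nat) (h : 1 ≤ m) :
    List.range' 1 m = List.range' 1 (m - 1) ++ [m] := by
  have h1 := List.range'_concat (s := 1) (n := m - 1) (step := 1)
  have h2 : 1 + 1 * (m - 1) = m := by omega
  have h3 : (m - 1) + 1 = m := by omega
  rw [h2, h3] at h1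
  exact h1

-- marking s as loaded cuts the filtered range below s (used for B's pop and direct load)
theorem pop_filter (loaded : List Bool) (s m : Nat) (hs1 : 1 ≤ s) (hsm : s ≤ m)
    (hslen : s < loaded.length)
    (hab : ∀ q, s < q → q ≤ m → loaded.getD q false = true) :
    (List.range' 1 m).filter (fun q => !(loaded.set s true).getD q false)
      = (List.range' 1 (s - 1)).filter (fun q => !loaded.getD q false) := by
  rw [filter_range'_high _ (s - 1) m (by omega) ?hh]
  case hh =>
    intro q h1 h2
    rcases Nat.eq_or_lt_of_le (Nat.succ_le_of_lt h1) with h | h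
    · have hq : q = s := by omega
      subst hq
      rw [getD_set_self loaded q hslen]
      rfl
    · rw [getD_set_ne loaded s q (by omega), hab q (by omega) h2]
      rfl
  refine List.filter_congr ?_
  intro q hq
  have hm := List.mem_range'_1.mp hq
  rw [getD_set_ne loaded s q (by omega)]

theorem filter_singleton_true (f : Nat → Bool) (a : Nat) (h : f a = true) :
    List.filter f [a] = [a] := by
  simp [h]

-- when B's answer is stuck at item i, bOuter returns i
theorem bOuter_stuck (order : List Int) (loaded : List Bool) (cB p i : Nat)
    (hi : i < order.length)
    (hcase : order.length + 1 < cB ∨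
      ((∀ q : Nat, cB ≤ q → q ≤ order.length + 1 → (q : Int) ≠ order.getD i 0) ∧
       (skipPtr loaded p = 0 ∨ ((skipPtr loaded p : Nat) : Int) ≠ order.getD i 0))) :
    bOuter order.length loaded cB p i (order.drop i) = i := by
  rw [drop_cons_getD order i hi, bOuter_cons]
  have hpop : ∀ (H2 : skipPtr loaded p = 0 ∨ ((skipPtr loaded p : Nat) : Int) ≠ order.getD i 0),
      ¬(0 < skipPtr loaded p ∧ ((skipPtr loaded p : Nat) : Int) = order.getD i 0) := by
    rintro (h | h) ⟨h1, h2⟩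
    · omega
    · exact h h2
  rcases hcase with hg | ⟨H1, H2⟩
  · rw [if_pos hg]
  · by_cases hg : order.length + 1 < cB
    · rw [if_pos hg]
    · rw [if_neg hg, if_neg (hpop H2), if_neg ?_]
      rintro ⟨h1, h2, h3⟩
      exact H1 (order.getD i 0).toNat (by omega) (by omega) (by omega)

-- the bisimulation between A's loop and B's loop
theorem main_lemma (order : List Int) (k : Nat) :
    ∀ (loaded : List Bool) (cB p : Nat) (stack : List Int) (cA i : Nat),
      stack = (((List.range' 1 (cA - 1)).filter
          (fun q => !loaded.getD q false)).reverse.map (fun (q : Nat) => (q : Int))) →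
      1 ≤ cB → cB ≤ cA → cA ≤ order.length + 2 → p < cB →
      loaded.length = order.length + 2 →
      (∀ q, p < q → q < cB → loaded.getD q false = true) →
      (∀ q, cB ≤ q → loaded.getD q false = false) →
      (cB < cA → ((∀ q : Nat, cB ≤ q → q < cA → (q : Int) ≠ order.getD i 0) ∧
                   (skipPtr loaded p = 0 ∨ ((skipPtr loaded p : Nat) : Int) ≠ order.getD i 0))) →
      2 * (order.length + 2 - cA) + stack.length ≤ k → i ≤ order.length →
      solutionLoop order stack cA i k
        = bOuter order.length loaded cB p i (order.drop i) := by
  induction k with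
  | zero =>
    intro loaded cB p stack cA i hstack hcB1 hcBA hcA2 hp hlen hI4 hI5 hH hk hi
    have hcA : order.length + 2 ≤ cA := by omega
    rcases Nat.lt_or_ge i order.length with hlt | hge
    · show i = _
      refine (bOuter_stuck order loaded cB p i hlt ?_).symm
      by_cases hg : order.length + 1 < cB
      · exact Or.inl hg
      · obtain ⟨H1, H2⟩ := hH (by omega)
        exact Or.inr ⟨fun q h1 h2 => H1 q h1 (by omega), H2⟩
    · have hie : i = order.length := by omega
      subst hie
      rw [List.drop_length]
      rfl
  | succ k IH =>
    intro loaded cB p stack cA i hstack hcB1 hcBA hcA2 hp hlen hI4 hI5 hH hk hi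
    rw [solutionLoop.eq_def]
    dsimp only
    by_cases hcle : cA ≤ order.length + 1
    · rw [if_pos hcle]
      rcases Nat.lt_or_ge i order.length with hlt | hge
      swap
      · rw [if_pos hge]
        have hie : i = order.length := by omega
        subst hie
        rw [List.drop_length]
        rfl
      · rw [if_neg (by omega : ¬ i ≥ order.length)]
        have hdrop := drop_cons_getD order i hlt
        have hguard : ¬ order.length + 1 < cB := by omega
        rcases Nat.lt_or_ge cB cA with hreg | hreg
        · -- regime cB < cA : A is mid push-phase, its stack top is cA - 1
          obtain ⟨H1, H2⟩ := hH hreg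
          have hpop : ¬(0 < skipPtr loaded p ∧ ((skipPtr loaded p : Nat) : Int) = order.getD i 0) := by
            rcases H2 with h | h
            · rintro ⟨h1, _⟩; omega
            · rintro ⟨_, h2⟩; exact h h2
          have hf1 : (!loaded.getD (cA - 1) false) = true := by
            rw [hI5 (cA - 1) (by omega)]
            rfl
          have hstk : stack = ((cA - 1 : Nat) : Int) ::
              (((List.range' 1 (cA - 1 - 1)).filter (fun q => !loaded.getD q false)).reverse.map
                (fun (q : Nat) => (q : Int))) := by
            rw [hstack, range'_one_concat (cA - 1) (by omega), List.filter_append,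
              filter_singleton_true _ _ hf1, List.reverse_append]
            simp only [List.reverse_cons, List.reverse_nil, List.nil_append,
              List.singleton_append, List.map_cons]
          have hsl := congrArg List.length hstk
          simp only [List.length_cons, List.length_map, List.length_reverse] at hsl
          rw [hstk]
          dsimp only
          rw [if_neg (H1 (cA - 1) (by omega) (by omega))]
          by_cases hw : order.getD i 0 = (cA : Int)
          · -- A loads cA straight; so does B
            rw [if_pos hw, hdrop, bOuter_cons, if_neg hguard, if_neg hpop,
              if_pos ⟨by omega, by omega, by omega⟩]
            have hwt : (order.getD i 0).toNat = cA := by omega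
            rw [hwt]
            refine IH (loaded.set cA true) (cA + 1) (cA - 1) _ (cA + 1) (i + 1) ?_ (by omega)
              (by omega) (by omega) (by omega) (by simp [hlen]) ?_ ?_
              (fun h => absurd h (by omega)) ?_ (by omega)
            · rw [← hstk, hstack]
              have : cA + 1 - 1 = cA := by omega
              rw [this, pop_filter loaded cA cA (by omega) (by omega) (by omega)
                (fun q h1 h2 => absurd (by omega : q ≤ cA) (by omega))]
            · intro q h1 h2
              have hq : q = cA := by omega
              subst hq
              exact getD_set_self loaded q (by omega)
            · intro q hq
              rw [getD_set_ne loaded cA q (by omega)]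
              exact hI5 q (by omega)
            · simp only [List.length_cons, List.length_map, List.length_reverse]
              omega
          · -- A pushes cA; B does not move
            rw [if_neg hw]
            refine IH loaded cB p _ (cA + 1) i ?_ (by omega) (by omega) (by omega) (by omega)
              hlen hI4 hI5 ?_ ?_ (by omega)
            · rw [← hstk, hstack]
              have h1 : cA + 1 - 1 = cA := by omega
              have hfcA : (!loaded.getD cA false) = true := by
                rw [hI5 cA (by omega)]
                rfl
              rw [h1, range'_one_concat cA (by omega), List.filter_append,
                filter_singleton_true _ _ hfcA, List.reverse_append]
              simp only [List.reverse_cons, List.reverse_nil, List.nil_append,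
                List.singleton_append, List.map_cons]
            · intro _
              refine ⟨fun q h1 h2 => ?_, H2⟩
              rcases Nat.lt_or_ge q cA with h | h
              · exact H1 q h1 h
              · have hq : q = cA := by omega
                subst hq
                exact fun h => hw h.symm
            · simp only [List.length_cons, List.length_map, List.length_reverse]
              omega
        · -- regime cB = cA : B's pointer sees A's stack top
          have heq : cB = cA := by omega
          subst heq
          have hs_le := skipPtr_le loaded p
          have habove : ∀ q, skipPtr loaded p < q → q ≤ cB - 1 → loaded.getD q false = true := by
            intro q h1 h2
            rcases Nat.lt_or_ge p q with h | h
            · exact hI4 q h (by omega)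
            · exact skipPtr_above loaded p q h1 h
          have hsplitStack := rev_filter_split (fun q => !loaded.getD q false) (cB - 1)
            (skipPtr loaded p) (by omega)
            (fun q h1 h2 => by show (!loaded.getD q false) = false; rw [habove q h1 h2]; rfl)
            (by
              rcases skipPtr_unl loaded p with h | h
              · exact Or.inl h
              · right
                show (!loaded.getD (skipPtr loaded p) false) = true
                rw [h]
                rfl)
          rcases Nat.eq_zero_or_pos (skipPtr loaded p) with hs0 | hs0
          · -- empty stack
            have hstk : stack = [] := by
              rw [hstack, hsplitStack, if_pos hs0]
              rfl
            have hfilnil : (List.range' 1 (cB - 1)).filter (fun q => !loaded.getD q false) = [] := by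
              have h0 : (((List.range' 1 (cB - 1)).filter
                  (fun q => !loaded.getD q false)).reverse.map (fun (q : Nat) => (q : Int))) = [] :=
                hstack.symm.trans hstk
              exact List.reverse_eq_nil_iff.mp (List.map_eq_nil_iff.mp h0)
            rw [hstk]
            dsimp only
            by_cases hw : order.getD i 0 = (cB : Int)
            · rw [if_pos hw, hdrop, bOuter_cons, if_neg hguard,
                if_neg (by rintro ⟨h1, _⟩; omega),
                if_pos ⟨by omega, by omega, by omega⟩]
              have hwt : (order.getD i 0).toNat = cB := by omega
              rw [hwt]
              refine IH (loaded.set cB true) (cB + 1) (cB - 1) [] (cB + 1) (i + 1) ?_ (by omega)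
                (by omega) (by omega) (by omega) (by simp [hlen]) ?_ ?_
                (fun h => absurd h (by omega)) ?_ (by omega)
              · have h1 : cB + 1 - 1 = cB := by omega
                rw [h1, pop_filter loaded cB cB (by omega) (by omega) (by omega)
                  (fun q h1 h2 => absurd (by omega : q ≤ cB) (by omega)), hfilnil]
                rfl
              · intro q h1 h2
                have hq : q = cB := by omega
                subst hq
                exact getD_set_self loaded q (by omega)
              · intro q hq
                rw [getD_set_ne loaded cB q (by omega)]
                exact hI5 q (by omega)
              · simp only [List.length_nil]
                omega
            · rw [if_neg hw]
              refine IH loaded cB p _ (cB + 1) i ?_ (by omega) (by omega) (by omega) (by omega)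
                hlen hI4 hI5 ?_ ?_ (by omega)
              · have hfcB : (!loaded.getD cB false) = true := by
                  rw [hI5 cB (by omega)]
                  rfl
                have h1 : cB + 1 - 1 = cB := by omega
                rw [h1, range'_one_concat cB (by omega), List.filter_append, hfilnil,
                  filter_singleton_true _ _ hfcB]
                rfl
              · intro _
                refine ⟨fun q h1 h2 => ?_, Or.inl hs0⟩
                have hq : q = cB := by omega
                subst hq
                exact fun h => hw h.symm
              · have hsl := congrArg List.length hstk
                simp only [List.length_nil] at hsl
                simp only [List.length_cons, List.length_nil]
                omega
          · -- nonempty stack, top = skipPtr loaded p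
            have hstk : stack = ((skipPtr loaded p : Nat) : Int) ::
                (((List.range' 1 (skipPtr loaded p - 1)).filter
                  (fun q => !loaded.getD q false)).reverse.map (fun (q : Nat) => (q : Int))) := by
              rw [hstack, hsplitStack, if_neg (by omega)]
              rfl
            have hsl := congrArg List.length hstk
            simp only [List.length_cons, List.length_map, List.length_reverse] at hsl
            rw [hstk]
            dsimp only
            by_cases htop : ((skipPtr loaded p : Nat) : Int) = order.getD i 0
            · -- pop in A = table-mark in B
              rw [if_pos htop, hdrop, bOuter_cons, if_neg hguard, if_pos ⟨hs0, htop⟩]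
              refine IH (loaded.set (skipPtr loaded p) true) cB (skipPtr loaded p) _ cB (i + 1)
                ?_ (by omega) (by omega) (by omega) (by omega) (by simp [hlen]) ?_ ?_
                (fun h => absurd h (by omega)) ?_ (by omega)
              · rw [pop_filter loaded (skipPtr loaded p) (cB - 1) (by omega) (by omega) (by omega)
                  habove]
              · intro q h1 h2
                rw [getD_set_ne loaded (skipPtr loaded p) q (by omega)]
                exact habove q h1 (by omega)
              · intro q hq
                rw [getD_set_ne loaded (skipPtr loaded p) q (by omega)]
                exact hI5 q (by omega)
              · simp only [List.length_map, List.length_reverse]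
                omega
            · rw [if_neg htop]
              by_cases hw : order.getD i 0 = (cB : Int)
              · rw [if_pos hw, hdrop, bOuter_cons, if_neg hguard,
                  if_neg (by rintro ⟨_, h2⟩; exact htop h2),
                  if_pos ⟨by omega, by omega, by omega⟩]
                have hwt : (order.getD i 0).toNat = cB := by omega
                rw [hwt]
                refine IH (loaded.set cB true) (cB + 1) (cB - 1) _ (cB + 1) (i + 1) ?_ (by omega)
                  (by omega) (by omega) (by omega) (by simp [hlen]) ?_ ?_
                  (fun h => absurd h (by omega)) ?_ (by omega)
                · rw [← hstk, hstack]
                  have h1 : cB + 1 - 1 = cB := by omega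
                  rw [h1, pop_filter loaded cB cB (by omega) (by omega) (by omega)
                    (fun q h1 h2 => absurd (by omega : q ≤ cB) (by omega))]
                · intro q h1 h2
                  have hq : q = cB := by omega
                  subst hq
                  exact getD_set_self loaded q (by omega)
                · intro q hq
                  rw [getD_set_ne loaded cB q (by omega)]
                  exact hI5 q (by omega)
                · simp only [List.length_cons, List.length_map, List.length_reverse]
                  omega
              · rw [if_neg hw]
                refine IH loaded cB p _ (cB + 1) i ?_ (by omega) (by omega) (by omega) (by omega)
                  hlen hI4 hI5 ?_ ?_ (by omega)
                · rw [← hstk, hstack]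
                  have hfcB : (!loaded.getD cB false) = true := by
                    rw [hI5 cB (by omega)]
                    rfl
                  have h1 : cB + 1 - 1 = cB := by omega
                  rw [h1, range'_one_concat cB (by omega), List.filter_append,
                    filter_singleton_true _ _ hfcB, List.reverse_append]
                  simp only [List.reverse_cons, List.reverse_nil, List.nil_append,
                    List.singleton_append, List.map_cons]
                · intro _
                  refine ⟨fun q h1 h2 => ?_, Or.inr htop⟩
                  have hq : q = cB := by omega
                  subst hq
                  exact fun h => hw h.symm
                · simp only [List.length_cons, List.length_map, List.length_reverse]
                  omega
    · -- A's belt is exhausted: both return i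
      rw [if_neg hcle]
      rcases Nat.lt_or_ge i order.length with hlt | hge
      · refine (bOuter_stuck order loaded cB p i hlt ?_).symm
        by_cases hg : order.length + 1 < cB
        · exact Or.inl hg
        · obtain ⟨H1, H2⟩ := hH (by omega)
          exact Or.inr ⟨fun q h1 h2 => H1 q h1 (by omega), H2⟩
      · have hie : i = order.length := by omega
        subst hie
        rw [List.drop_length]
        rfl

theorem getD_replicate_false (n q : Nat) : (List.replicate n false).getD q false = false := by
  rcases Nat.lt_or_ge q n with h | h
  · simp [List.getD, h]
  · simp [List.getD, Nat.not_lt.mpr h]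

theorem solution_spec' (order : List Int) : solution order = solution_alt order := by
  unfold solution solution_alt
  rw [main_lemma order (2 * (order.length + 2)) (List.replicate (order.length + 2) false) 1 0 [] 1 0
    (by simp) (by omega) (by omega) (by omega) (by omega) (by simp)
    (by intro q h1 h2; omega)
    (by intro q _; exact getD_replicate_false _ _)
    (by intro h; exact absurd h (by omega))
    (by simp only [List.length_nil]; omega) (by omega)]
  rfl

-- ===== VERDICT (by name: the statement is the Claim_ definition above) =====
theorem solution_spec : Claim_equal_solution := by
  intro order _
  exact solution_spec' order
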